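-- pv_equiv track=rewrite | github.com/Pallavireddy1999/Pallavi | strings.py/guests.py | min_group_swaps
-- ===== SOURCE A (Python) =====
-- def min_group_swaps(nums):
--     num_groups = 3
--     group_size = len(nums) // num_groups
--     swaps = 0
--
--     for group in range(1, num_groups + 1):
--         group_start = (group - 1) * group_size
--         group_end = group_start + group_size
--         correct_positions = range(group_start, group_end)
--         num_incorrect_positions = sum(1 for i, num in enumerate(nums) if num == group and i not in correct_positions)
--         swaps += num_incorrect_positions
--
--     return swaps
-- ===== SOURCE B (Python) =====
-- def min_group_swaps(nums):
--     group_size = len(nums) // 3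
--     return sum(
--         1
--         for i, num in enumerate(nums)
--         if num in (1, 2, 3) and not ((num - 1) * group_size <= i < num * group_size)
--     )
-- ===== Notes on version B (the rewrite author's own statement) =====
-- stated objective: simpler
-- what changed: Replaces A's three full scans (one per group, each rebuilding that group's index range) with a single pass over enumerate(nums) that derives each element's correct position range from its own value.
import Mathlib
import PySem

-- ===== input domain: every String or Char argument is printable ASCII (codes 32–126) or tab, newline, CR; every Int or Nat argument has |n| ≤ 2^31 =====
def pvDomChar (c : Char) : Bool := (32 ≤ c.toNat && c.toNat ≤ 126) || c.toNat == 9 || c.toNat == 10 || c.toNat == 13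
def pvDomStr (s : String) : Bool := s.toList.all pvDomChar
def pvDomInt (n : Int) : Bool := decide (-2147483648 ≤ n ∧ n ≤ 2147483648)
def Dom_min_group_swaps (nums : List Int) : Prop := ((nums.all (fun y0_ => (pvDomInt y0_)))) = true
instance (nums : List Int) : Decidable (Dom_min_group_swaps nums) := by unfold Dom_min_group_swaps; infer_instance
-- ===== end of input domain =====

-- B replaces A's three per-group scans by one pass that derives each element's
-- correct position range from its own value (objective: simpler; return values proved equal).

-- ===== PORT A =====
-- literal port of A: for group in range(1,4): count elements equal to `group`
-- sitting outside that group's index range, summing the three counts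
def min_group_swaps (nums : List Int) : Int :=
  let group_size : Int := PySem.Int.floordiv (nums.length : Int) 3
  (PySem.List.pyRange 1 (3 + 1) 1).foldl
    (fun swaps group =>
      let group_start := (group - 1) * group_size
      let group_end := group_start + group_size
      swaps + ((PySem.List.enumerate nums 0).foldl
        (fun acc p =>
          if p.2 = group ∧ ¬(group_start ≤ p.1 ∧ p.1 < group_end) then acc + 1 else acc) 0))
    0

-- ===== PORT B =====
-- literal port of B: one pass, each element checked against its own group's range
def min_group_swaps_alt (nums : List Int) : Int :=
  let group_size : Int := PySem.Int.floordiv (nums.length : Int) 3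
  (PySem.List.enumerate nums 0).foldl
    (fun acc p =>
      if (p.2 = 1 ∨ p.2 = 2 ∨ p.2 = 3) ∧
          ¬((p.2 - 1) * group_size ≤ p.1 ∧ p.1 < p.2 * group_size) then acc + 1 else acc) 0

-- ===== PRECONDITION & SPEC =====
def Spec_min_group_swaps (nums : List Int) (out : Int) : Prop := out = min_group_swaps_alt nums
instance (nums : List Int) (out : Int) : Decidable (Spec_min_group_swaps nums out) := by unfold Spec_min_group_swaps; infer_instance

-- ===== CLAIM (what is proved, stated in full; the proofs are below) =====
def Claim_equal_min_group_swaps : Prop := ∀ (nums : List Int), Dom_min_group_swaps nums → Spec_min_group_swaps nums (min_group_swaps nums)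

-- ===== LEMMAS AND PROOFS =====

-- A's inner counting loop, for one group g
def pvCountA (gs g : Int) (l : List (Int × Int)) : Int :=
  l.foldl (fun acc p =>
    if p.2 = g ∧ ¬((g - 1) * gs ≤ p.1 ∧ p.1 < (g - 1) * gs + gs) then acc + 1 else acc) 0

-- B's single loop
def pvCountB (gs : Int) (l : List (Int × Int)) : Int :=
  l.foldl (fun acc p =>
    if (p.2 = 1 ∨ p.2 = 2 ∨ p.2 = 3) ∧
        ¬((p.2 - 1) * gs ≤ p.1 ∧ p.1 < p.2 * gs) then acc + 1 else acc) 0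

lemma pvCountA_shift (gs g : Int) (l : List (Int × Int)) (a : Int) :
    l.foldl (fun acc p =>
      if p.2 = g ∧ ¬((g - 1) * gs ≤ p.1 ∧ p.1 < (g - 1) * gs + gs) then acc + 1 else acc) a
    = a + pvCountA gs g l := by
  induction l generalizing a with
  | nil => simp [pvCountA]
  | cons p t ih =>
      simp only [pvCountA, List.foldl_cons]
      simp only [ih]
      split <;> omega

lemma pvCountB_shift (gs : Int) (l : List (Int × Int)) (a : Int) :
    l.foldl (fun acc p =>
      if (p.2 = 1 ∨ p.2 = 2 ∨ p.2 = 3) ∧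
          ¬((p.2 - 1) * gs ≤ p.1 ∧ p.1 < p.2 * gs) then acc + 1 else acc) a
    = a + pvCountB gs l := by
  induction l generalizing a with
  | nil => simp [pvCountB]
  | cons p t ih =>
      simp only [pvCountB, List.foldl_cons]
      simp only [ih]
      split <;> omega

lemma pvCount_split (gs : Int) (l : List (Int × Int)) :
    pvCountB gs l = pvCountA gs 1 l + pvCountA gs 2 l + pvCountA gs 3 l := by
  induction l with
  | nil => simp [pvCountA, pvCountB]
  | cons p t ih =>
      obtain ⟨i, num⟩ := p
      simp only [pvCountA, pvCountB, List.foldl_cons]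
      rw [pvCountA_shift, pvCountA_shift, pvCountA_shift, pvCountB_shift]
      rw [ih]
      generalize pvCountA gs 1 t = x1
      generalize pvCountA gs 2 t = x2
      generalize pvCountA gs 3 t = x3
      by_cases h1 : num = 1 <;> by_cases h2 : num = 2 <;> by_cases h3 : num = 3 <;>
        subst_vars <;> split_ifs <;> omega

theorem pv_main (nums : List Int) :
    min_group_swaps nums = min_group_swaps_alt nums := by
  show ((0 + pvCountA (PySem.Int.floordiv (nums.length : Int) 3) 1 (PySem.List.enumerate nums 0))
        + pvCountA (PySem.Int.floordiv (nums.length : Int) 3) 2 (PySem.List.enumerate nums 0))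
        + pvCountA (PySem.Int.floordiv (nums.length : Int) 3) 3 (PySem.List.enumerate nums 0)
      = pvCountB (PySem.Int.floordiv (nums.length : Int) 3) (PySem.List.enumerate nums 0)
  rw [pvCount_split]
  ring

-- ===== VERDICT (by name: the statement is the Claim_ definition above) =====
theorem min_group_swaps_spec : Claim_equal_min_group_swaps := by
  intro nums _
  exact pv_main nums
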